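-- pv_equiv track=rewrite | github.com/Koudeedia/Koudeedia.github.io | Minijeu.py | fil_d_ariane
-- ===== SOURCE A (Python) =====
-- def fil_d_ariane(maze, joueur, items):
--     """
--     Vérifie si le joueur peut atteindre la sortie et tous les objets (items).
--     Si ce n'est pas possible, retourne False pour régénérer le labyrinthe.
--     """
--     def dfs(x, y, visited):
--         """Explore les cases accessibles à partir de (x, y)."""
--         if (x, y) in visited:
--             return
--         visited.add((x, y))
--
--         for dx, dy in [(-1, 0), (1, 0), (0, -1), (0, 1)]:  # Déplacements possibles
--             nx, ny = x + dx, y + dy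
--             if 0 <= nx < len(maze) and 0 <= ny < len(maze[0]) and maze[nx][ny] != 1:
--                 dfs(nx, ny, visited)
--
--     # Initialiser la recherche à partir de la position du joueur
--     visited = set()
--     dfs(joueur["x"],joueur["y"], visited)
--
--     # Identifier la sortie
--     sortie = [(x, y) for x in range(len(maze)) for y in range(len(maze[0])) if maze[x][y] == 2]
--     if not sortie:
--         return False  # Pas de sortie trouvée dans le labyrinthe
--
--     # Construire la liste des cibles à atteindre : sortie + positions des objets
--     targets = sortie + [(x, y) for x, y in items.items()]
--
--     # Vérifier si toutes les cibles sont atteignables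
--     return all(target in visited for target in targets)
-- ===== SOURCE B (Python) =====
-- def fil_d_ariane(maze, joueur, items):
--     """
--     Same check as A, but the recursive dfs is replaced by an iterative
--     flood fill with an explicit stack (no recursion depth issues by design).
--     """
--     rows = len(maze)
--     cols = len(maze[0]) if maze else 0
--
--     visited = set()
--     stack = [(joueur["x"], joueur["y"])]
--     while stack:
--         c = stack.pop()
--         if c in visited:
--             continue
--         visited.add(c)
--         x, y = c
--         for n in ((x - 1, y), (x + 1, y), (x, y - 1), (x, y + 1)):
--             if 0 <= n[0] < rows and 0 <= n[1] < cols and maze[n[0]][n[1]] != 1: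
--                 stack.append(n)
--
--     exits = [(i, j) for i in range(rows) for j in range(cols) if maze[i][j] == 2]
--     return bool(exits) and all(t in visited for t in exits) \
--         and all((k, v) in visited for k, v in items.items())
-- ===== Notes on version B (the rewrite author's own statement) =====
-- stated objective: alternative
-- what changed: The recursive inner dfs (one Python call frame per visited cell, mutating a shared visited set) is replaced by an iterative flood fill over an explicit stack, and the final check is a short-circuit conjunction instead of an early return plus one all() over a concatenated target list.
import Mathlib
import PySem

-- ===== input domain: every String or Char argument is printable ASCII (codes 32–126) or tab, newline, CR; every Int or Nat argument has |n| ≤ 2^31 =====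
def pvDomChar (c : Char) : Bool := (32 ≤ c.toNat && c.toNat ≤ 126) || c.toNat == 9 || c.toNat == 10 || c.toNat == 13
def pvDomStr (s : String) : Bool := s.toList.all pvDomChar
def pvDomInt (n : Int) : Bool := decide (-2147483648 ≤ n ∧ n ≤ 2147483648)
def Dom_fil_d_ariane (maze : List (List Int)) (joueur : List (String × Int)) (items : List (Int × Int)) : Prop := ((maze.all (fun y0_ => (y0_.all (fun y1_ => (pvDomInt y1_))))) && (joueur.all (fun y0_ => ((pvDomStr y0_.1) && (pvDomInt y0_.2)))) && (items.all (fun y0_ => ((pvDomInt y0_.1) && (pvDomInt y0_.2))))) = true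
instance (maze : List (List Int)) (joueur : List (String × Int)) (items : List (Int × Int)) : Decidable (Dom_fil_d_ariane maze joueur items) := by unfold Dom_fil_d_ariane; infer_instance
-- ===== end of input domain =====

-- B replaces A's recursive dfs by an iterative stack flood fill (same asymptotic cost,
-- no recursion); return values proved equal on Pre_ (where the Python A returns).

-- the guard '0 <= nx < rows and 0 <= ny < cols and maze[nx][ny] != 1', textually identical
-- in both Pythons; the cell is read with a default (1), exact under Pre_ (no short rows).
def pvOk (maze : List (List Int)) (rows cols : Nat) (n : Int × Int) : Bool :=
  decide (0 ≤ n.1) && decide (n.1 < (rows : Int)) && decide (0 ≤ n.2) && decide (n.2 < (cols : Int)) &&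
    (PySem.List.pyGetD (PySem.List.pyGetD maze n.1 []) n.2 1 != 1)

-- the in-bounds cells, as a Finset (used only for termination/fuel bounds)
def pvCells (rows cols : Nat) : Finset (Int × Int) :=
  (Finset.range rows ×ˢ Finset.range cols).image (fun p => ((p.1 : Int), (p.2 : Int)))

-- ===== PORT A =====
-- A's recursive dfs; the fuel argument only makes the recursion structural, and
-- rows*cols+2 is proved sufficient (pvDfsA_fuel-independent via the lemmas below).
def pvDfsA (maze : List (List Int)) (rows cols : Nat) :
    Nat → Int × Int → PySem.Set (Int × Int) → PySem.Set (Int × Int)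
  | 0, _, visited => visited
  | fuel + 1, c, visited =>
      if c ∈ visited then visited
      else
        [((-1 : Int), (0 : Int)), (1, 0), (0, -1), (0, 1)].foldl
          (fun acc d =>
            if pvOk maze rows cols (c.1 + d.1, c.2 + d.2) then
              pvDfsA maze rows cols fuel (c.1 + d.1, c.2 + d.2) acc
            else acc)
          (PySem.Set.add visited c)

def fil_d_ariane (maze : List (List Int)) (joueur : List (String × Int)) (items : List (Int × Int)) : Bool :=
  let rows := maze.length
  let cols := (maze.headD []).length     -- len(maze[0]); only reached lazily in Python, guarded by rows below
  let j := PySem.Dict.ofList joueur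
  -- joueur["x"], joueur["y"]: getD exact under Pre_ (keys present)
  let visited := pvDfsA maze rows cols (rows * cols + 2) (j.getD "x" 0, j.getD "y" 0) PySem.Set.empty
  let sortie := (List.range rows).flatMap (fun x =>
    (List.range cols).filterMap (fun y =>
      if PySem.List.pyGetD (PySem.List.pyGetD maze (x : Int) []) (y : Int) 0 == 2 then
        some ((x : Int), (y : Int))
      else none))
  if sortie.isEmpty then false
  else
    let targets := sortie ++ (PySem.Dict.ofList items).items
    targets.all (fun t => decide (t ∈ visited))

-- ===== PORT B =====
-- B's stack: Python pops/pushes at the END of the list; modeled with the head as the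
-- top of the stack, so one iteration pushes the ok neighbours reversed onto the front.
def pvFloodB (maze : List (List Int)) (rows cols : Nat) :
    List (Int × Int) → PySem.Set (Int × Int) → PySem.Set (Int × Int)
  | [], visited => visited
  | c :: rest, visited =>
      if c ∈ visited then pvFloodB maze rows cols rest visited
      else
        pvFloodB maze rows cols
          ((([(c.1 - 1, c.2), (c.1 + 1, c.2), (c.1, c.2 - 1), (c.1, c.2 + 1)].filter
              (pvOk maze rows cols)).reverse) ++ rest)
          (PySem.Set.add visited c)
termination_by st visited =>
  ((((pvCells rows cols) ∪ st.toFinset) \ visited.toFinset).card, st.length)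
decreasing_by
  · apply Prod.Lex.right' <;> simp_all [Finset.card_le_card, Finset.sdiff_subset,
      Finset.subset_iff]
  · apply Prod.Lex.left
    have hmem : c ∈ ((pvCells rows cols ∪ (c :: rest).toFinset) \ visited.toFinset) := by
      simp_all
    apply Nat.lt_of_le_of_lt (m := ((pvCells rows cols ∪ (c :: rest).toFinset) \ visited.toFinset).card - 1)
    · have hsub : ((pvCells rows cols ∪ ((([(c.1 - 1, c.2), (c.1 + 1, c.2), (c.1, c.2 - 1), (c.1, c.2 + 1)].filter
              (pvOk maze rows cols)).reverse) ++ rest).toFinset) \ (PySem.Set.add visited c).toFinset)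
          ⊆ ((pvCells rows cols ∪ (c :: rest).toFinset) \ visited.toFinset).erase c := by
        intro z hz
        simp only [Finset.mem_sdiff, Finset.mem_union, List.mem_toFinset, List.mem_append,
          List.mem_reverse, List.mem_filter, Finset.mem_erase, List.mem_cons,
          PySem.Set.mem_add] at *
        rcases hz with ⟨hz1, hz2⟩
        refine ⟨fun hzc => hz2 (Or.inr hzc), ?_, fun hzv => hz2 (Or.inl hzv)⟩
        rcases hz1 with h | h
        · exact Or.inl h
        · rcases h with ⟨hn, hok⟩ | h
          · left
            simp only [pvOk, Bool.and_eq_true, decide_eq_true_eq] at hok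
            simp only [pvCells, Finset.mem_image, Finset.mem_product, Finset.mem_range]
            exact ⟨(z.1.toNat, z.2.toNat), by simp [Finset.mem_product]; omega, by simp [Prod.ext_iff]; omega⟩
          · exact Or.inr (Or.inr h)
      calc _ ≤ (((pvCells rows cols ∪ (c :: rest).toFinset) \ visited.toFinset).erase c).card :=
              Finset.card_le_card hsub
        _ = _ := Finset.card_erase_of_mem hmem
    · have := Finset.card_pos.mpr ⟨c, hmem⟩
      omega

def fil_d_ariane_alt (maze : List (List Int)) (joueur : List (String × Int)) (items : List (Int × Int)) : Bool :=
  let rows := maze.length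
  let cols := (maze.headD []).length     -- len(maze[0]) if maze else 0 (headD [] gives 0 on [])
  let d := PySem.Dict.ofList joueur
  let visited := pvFloodB maze rows cols [(d.getD "x" 0, d.getD "y" 0)] PySem.Set.empty
  let exits := (List.range rows).flatMap (fun i =>
    (List.range cols).filterMap (fun jn =>
      if PySem.List.pyGetD (PySem.List.pyGetD maze (i : Int) []) (jn : Int) 0 == 2 then
        some ((i : Int), (jn : Int))
      else none))
  !exits.isEmpty && exits.all (fun t => decide (t ∈ visited)) &&
    (PySem.Dict.ofList items).items.all (fun t => decide (t ∈ visited))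

-- ===== PRECONDITION & SPEC =====
-- Pre_ excludes exactly the inputs where the Python A raises: a KeyError when joueur
-- lacks "x" or "y", and an IndexError when some row is shorter than row 0 (the scan
-- reads maze[x][y] for every y < len(maze[0])). Rows longer than row 0 are fine.
def Pre_fil_d_ariane (maze : List (List Int)) (joueur : List (String × Int)) (items : List (Int × Int)) : Prop :=
  (∀ row ∈ maze, (maze.headD []).length ≤ row.length) ∧
    (PySem.Dict.ofList joueur).contains "x" = true ∧
    (PySem.Dict.ofList joueur).contains "y" = true

instance (maze : List (List Int)) (joueur : List (String × Int)) (items : List (Int × Int)) : Decidable (Pre_fil_d_ariane maze joueur items) := by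
  unfold Pre_fil_d_ariane; infer_instance

def pvWitness_fil_d_ariane : List (List Int) × (List (String × Int)) × (List (Int × Int)) :=
  ([[0, 0], [1, 2]], [("x", 0), ("y", 0)], [(0, 1)])

def Spec_fil_d_ariane (maze : List (List Int)) (joueur : List (String × Int)) (items : List (Int × Int)) (out : Bool) : Prop := out = fil_d_ariane_alt maze joueur items
instance (maze : List (List Int)) (joueur : List (String × Int)) (items : List (Int × Int)) (out : Bool) : Decidable (Spec_fil_d_ariane maze joueur items out) := by unfold Spec_fil_d_ariane; infer_instance

-- ===== CLAIM (what is proved, stated in full; the proofs are below) =====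
def Claim_equal_fil_d_ariane : Prop := ∀ (maze : List (List Int)) (joueur : List (String × Int)) (items : List (Int × Int)), Dom_fil_d_ariane maze joueur items → Pre_fil_d_ariane maze joueur items → Spec_fil_d_ariane maze joueur items (fil_d_ariane maze joueur items)

-- ===== LEMMAS AND PROOFS =====

def pvStep (maze : List (List Int)) (rows cols : Nat) (c n : Int × Int) : Prop :=
  pvOk maze rows cols n = true ∧
    (n = (c.1 - 1, c.2) ∨ n = (c.1 + 1, c.2) ∨ n = (c.1, c.2 - 1) ∨ n = (c.1, c.2 + 1))

def pvReach (maze : List (List Int)) (rows cols : Nat) : Int × Int → Int × Int → Prop :=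
  Relation.ReflTransGen (pvStep maze rows cols)

theorem pvFloodB_mono (maze : List (List Int)) (rows cols : Nat) :
    ∀ (st : List (Int × Int)) (v : PySem.Set (Int × Int)) (x : Int × Int),
      x ∈ v → x ∈ pvFloodB maze rows cols st v := by
  intro st v
  induction st, v using pvFloodB.induct maze rows cols with
  | case1 v => intro x hx; simpa [pvFloodB] using hx
  | case2 c rest v h ih =>
      intro x hx; rw [pvFloodB]; simp only [if_pos h]; exact ih x hx
  | case3 c rest v h ih =>
      intro x hx; rw [pvFloodB]; simp only [if_neg h]
      exact ih x (by simp [PySem.Set.mem_add, hx])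
theorem pvFloodB_stack (maze : List (List Int)) (rows cols : Nat) :
    ∀ (st : List (Int × Int)) (v : PySem.Set (Int × Int)) (s : Int × Int),
      s ∈ st → s ∈ pvFloodB maze rows cols st v := by
  intro st v
  induction st, v using pvFloodB.induct maze rows cols with
  | case1 v => intro s hs; simp at hs
  | case2 c rest v h ih =>
      intro s hs; rw [pvFloodB]; simp only [if_pos h]
      rcases List.mem_cons.mp hs with rfl | hs
      · exact pvFloodB_mono maze rows cols rest v s h
      · exact ih s hs
  | case3 c rest v h ih =>
      intro s hs; rw [pvFloodB]; simp only [if_neg h]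
      rcases List.mem_cons.mp hs with rfl | hs
      · exact pvFloodB_mono maze rows cols _ _ s (by simp [PySem.Set.mem_add])
      · exact ih s (by simp [hs])

theorem pvFloodB_sound (maze : List (List Int)) (rows cols : Nat) :
    ∀ (st : List (Int × Int)) (v : PySem.Set (Int × Int)) (x : Int × Int),
      x ∈ pvFloodB maze rows cols st v → x ∈ v ∨ ∃ s ∈ st, pvReach maze rows cols s x := by
  intro st v
  induction st, v using pvFloodB.induct maze rows cols with
  | case1 v => intro x hx; rw [pvFloodB] at hx; exact Or.inl hx
  | case2 c rest v h ih =>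
      intro x hx; rw [pvFloodB] at hx; simp only [if_pos h] at hx
      rcases ih x hx with hv | ⟨s, hs, hr⟩
      · exact Or.inl hv
      · exact Or.inr ⟨s, List.mem_cons_of_mem _ hs, hr⟩
  | case3 c rest v h ih =>
      intro x hx; rw [pvFloodB] at hx; simp only [if_neg h] at hx
      rcases ih x hx with hv | ⟨s, hs, hr⟩
      · rcases (PySem.Set.mem_add _ _ _).mp hv with hv | rfl
        · exact Or.inl hv
        · exact Or.inr ⟨x, List.mem_cons_self, Relation.ReflTransGen.refl⟩
      · rcases List.mem_append.mp hs with hs | hs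
        · refine Or.inr ⟨c, List.mem_cons_self, Relation.ReflTransGen.head ?_ hr⟩
          rw [List.mem_reverse, List.mem_filter] at hs
          refine ⟨hs.2, ?_⟩
          simpa using hs.1
        · exact Or.inr ⟨s, List.mem_cons_of_mem _ hs, hr⟩

theorem pvFloodB_closed (maze : List (List Int)) (rows cols : Nat) :
    ∀ (st : List (Int × Int)) (v : PySem.Set (Int × Int)),
      (∀ x ∈ v, ∀ n, pvStep maze rows cols x n → n ∈ v ∨ n ∈ st) →
      ∀ x ∈ pvFloodB maze rows cols st v, ∀ n, pvStep maze rows cols x n →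
        n ∈ pvFloodB maze rows cols st v := by
  intro st v
  induction st, v using pvFloodB.induct maze rows cols with
  | case1 v =>
      intro hI x hx n hstep
      rw [pvFloodB] at hx ⊢
      rcases hI x hx n hstep with hv | hst
      · exact hv
      · simp at hst
  | case2 c rest v h ih =>
      intro hI x hx n hstep
      rw [pvFloodB] at hx ⊢; simp only [if_pos h] at hx ⊢
      refine ih ?_ x hx n hstep
      intro y hy m hm
      rcases hI y hy m hm with hv | hst
      · exact Or.inl hv
      · rcases List.mem_cons.mp hst with rfl | hst
        · exact Or.inl h
        · exact Or.inr hst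
  | case3 c rest v h ih =>
      intro hI x hx n hstep
      rw [pvFloodB] at hx ⊢; simp only [if_neg h] at hx ⊢
      refine ih ?_ x hx n hstep
      intro y hy m hm
      rcases (PySem.Set.mem_add _ _ _).mp hy with hy | rfl
      · rcases hI y hy m hm with hv | hst
        · exact Or.inl ((PySem.Set.mem_add _ _ _).mpr (Or.inl hv))
        · rcases List.mem_cons.mp hst with rfl | hst
          · exact Or.inl ((PySem.Set.mem_add _ _ _).mpr (Or.inr rfl))
          · exact Or.inr (List.mem_append.mpr (Or.inr hst))
      · refine Or.inr (List.mem_append.mpr (Or.inl ?_))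
        rw [List.mem_reverse, List.mem_filter]
        constructor
        · rcases hm.2 with rfl | rfl | rfl | rfl <;> simp
        · exact hm.1

theorem pvFloodB_spec (maze : List (List Int)) (rows cols : Nat) (s : Int × Int) (t : Int × Int) :
    t ∈ pvFloodB maze rows cols [s] PySem.Set.empty ↔ pvReach maze rows cols s t := by
  constructor
  · intro h
    rcases pvFloodB_sound maze rows cols [s] PySem.Set.empty t h with hv | ⟨s', hs', hr⟩
    · simp [PySem.Set.empty] at hv
    · rcases List.mem_singleton.mp hs' with rfl; exact hr
  · intro h
    induction h with
    | refl => exact pvFloodB_stack maze rows cols [s] _ s (by simp)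
    | tail h1 h2 ih =>
        exact pvFloodB_closed maze rows cols [s] PySem.Set.empty (by simp [PySem.Set.empty]) _ ih _ h2
theorem pvOk_mem_cells {maze : List (List Int)} {rows cols : Nat} {n : Int × Int}
    (h : pvOk maze rows cols n = true) : n ∈ pvCells rows cols := by
  simp only [pvOk, Bool.and_eq_true, decide_eq_true_eq] at h
  simp only [pvCells, Finset.mem_image, Finset.mem_product, Finset.mem_range]
  exact ⟨(n.1.toNat, n.2.toNat), by simp [Finset.mem_product]; omega, by simp [Prod.ext_iff]; omega⟩

theorem pv_mem_foldl {F : PySem.Set (Int × Int) → (Int × Int) → PySem.Set (Int × Int)}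
    (h : ∀ a b x, x ∈ a → x ∈ F a b) :
    ∀ (ds : List (Int × Int)) (a : PySem.Set (Int × Int)) (x : Int × Int),
      x ∈ a → x ∈ ds.foldl F a := by
  intro ds
  induction ds with
  | nil => intro a x hx; exact hx
  | cons d ds ih => intro a x hx; exact ih _ _ (h _ _ _ hx)

theorem pvDfsA_mono (maze : List (List Int)) (rows cols : Nat) :
    ∀ (f : Nat) (c : Int × Int) (v : PySem.Set (Int × Int)) (x : Int × Int),
      x ∈ v → x ∈ pvDfsA maze rows cols f c v := by
  intro f
  induction f with
  | zero => intro c v x hx; exact hx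
  | succ f ih =>
      intro c v x hx
      rw [pvDfsA]
      by_cases h : c ∈ v
      · simpa [h] using hx
      · simp only [if_neg h]
        refine pv_mem_foldl ?_ _ _ x ((PySem.Set.mem_add _ _ _).mpr (Or.inl hx))
        intro a b y hy
        dsimp only
        split
        · exact ih _ _ _ hy
        · exact hy

theorem pvDfsA_self (maze : List (List Int)) (rows cols : Nat)
    (f : Nat) (hf : 0 < f) (c : Int × Int) (v : PySem.Set (Int × Int)) :
    c ∈ pvDfsA maze rows cols f c v := by
  obtain ⟨f, rfl⟩ : ∃ f', f = f' + 1 := ⟨f - 1, by omega⟩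
  rw [pvDfsA]
  by_cases h : c ∈ v
  · simpa [h]
  · simp only [if_neg h]
    refine pv_mem_foldl ?_ _ _ c ((PySem.Set.mem_add _ _ _).mpr (Or.inr rfl))
    intro a b y hy
    dsimp only
    split
    · exact pvDfsA_mono maze rows cols _ _ _ _ hy
    · exact hy

theorem pvStep_of_delta {maze : List (List Int)} {rows cols : Nat} {c d : Int × Int}
    (hd : d = ((-1 : Int), (0 : Int)) ∨ d = (1, 0) ∨ d = (0, -1) ∨ d = (0, 1))
    (hok : pvOk maze rows cols (c.1 + d.1, c.2 + d.2) = true) :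
    pvStep maze rows cols c (c.1 + d.1, c.2 + d.2) := by
  refine ⟨hok, ?_⟩
  rcases hd with rfl | rfl | rfl | rfl
  · left; simp [Prod.ext_iff]; omega
  · right; left; simp [Prod.ext_iff]
  · right; right; left; simp [Prod.ext_iff]; omega
  · right; right; right; simp [Prod.ext_iff]

theorem pvDfsA_sound (maze : List (List Int)) (rows cols : Nat) :
    ∀ (f : Nat) (c : Int × Int) (v : PySem.Set (Int × Int)) (x : Int × Int),
      x ∈ pvDfsA maze rows cols f c v → x ∈ v ∨ pvReach maze rows cols c x := by
  intro f
  induction f with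
  | zero => intro c v x hx; exact Or.inl hx
  | succ f ih =>
      intro c v x hx
      rw [pvDfsA] at hx
      by_cases h : c ∈ v
      · simp only [if_pos h] at hx; exact Or.inl hx
      · simp only [if_neg h] at hx
        have key : ∀ (ds : List (Int × Int)),
            (∀ d ∈ ds, d = ((-1 : Int), (0 : Int)) ∨ d = (1, 0) ∨ d = (0, -1) ∨ d = (0, 1)) →
            ∀ a, (∀ y ∈ a, y ∈ v ∨ pvReach maze rows cols c y) →
            ∀ y ∈ ds.foldl (fun acc d =>
              if pvOk maze rows cols (c.1 + d.1, c.2 + d.2) then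
                pvDfsA maze rows cols f (c.1 + d.1, c.2 + d.2) acc
              else acc) a, y ∈ v ∨ pvReach maze rows cols c y := by
          intro ds
          induction ds with
          | nil => intro _ a ha y hy; exact ha y hy
          | cons d ds ihd =>
              intro hforms a ha y hy
              simp only [List.foldl_cons] at hy
              refine ihd (fun e he => hforms e (List.mem_cons_of_mem _ he)) _ ?_ y hy
              intro z hz
              by_cases hok : pvOk maze rows cols (c.1 + d.1, c.2 + d.2) = true
              · rw [if_pos hok] at hz
                rcases ih _ _ _ hz with hza | hzr
                · exact ha z hza
                · exact Or.inr (Relation.ReflTransGen.head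
                    (pvStep_of_delta (hforms d List.mem_cons_self) hok) hzr)
              · rw [if_neg hok] at hz
                exact ha z hz
        refine key _ (by decide) _ ?_ x hx
        intro y hy
        rcases (PySem.Set.mem_add _ _ _).mp hy with hy | rfl
        · exact Or.inl hy
        · exact Or.inr Relation.ReflTransGen.refl

def pvMuA (rows cols : Nat) (c : Int × Int) (v : PySem.Set (Int × Int)) : Nat :=
  ((insert c (pvCells rows cols)) \ v.toFinset).card

theorem pvMu_lt {rows cols : Nat} {c n : Int × Int} {v acc : PySem.Set (Int × Int)}
    (hc : c ∉ v) (hsub : ∀ z, z ∈ v ∨ z = c → z ∈ acc) (hn : n ∈ pvCells rows cols) :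
    pvMuA rows cols n acc < pvMuA rows cols c v := by
  unfold pvMuA
  rw [Finset.insert_eq_self.mpr hn]
  have hcmem : c ∈ insert c (pvCells rows cols) \ v.toFinset := by
    simp [List.mem_toFinset, hc]
  have hsub2 : (pvCells rows cols \ acc.toFinset)
      ⊆ (insert c (pvCells rows cols) \ v.toFinset).erase c := by
    intro z hz
    simp only [Finset.mem_sdiff, Finset.mem_erase, Finset.mem_insert, List.mem_toFinset] at *
    exact ⟨by rintro rfl; exact hz.2 (hsub _ (Or.inr rfl)), Or.inr hz.1,
      fun hzv => hz.2 (hsub z (Or.inl hzv))⟩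
  calc (pvCells rows cols \ acc.toFinset).card
      ≤ ((insert c (pvCells rows cols) \ v.toFinset).erase c).card := Finset.card_le_card hsub2
    _ = (insert c (pvCells rows cols) \ v.toFinset).card - 1 := Finset.card_erase_of_mem hcmem
    _ < (insert c (pvCells rows cols) \ v.toFinset).card := by
        have := Finset.card_pos.mpr ⟨c, hcmem⟩; omega

set_option maxHeartbeats 1000000 in
theorem pvDfsA_closed (maze : List (List Int)) (rows cols : Nat) :
    ∀ (f : Nat) (c : Int × Int) (v : PySem.Set (Int × Int)),
      pvMuA rows cols c v < f →
      ∀ x ∈ pvDfsA maze rows cols f c v, x ∉ v →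
      ∀ n, pvStep maze rows cols x n → n ∈ pvDfsA maze rows cols f c v := by
  intro f
  induction f with
  | zero => intro c v hμ; omega
  | succ f ih =>
      intro c v hμ x hx hxv n hstep
      rw [pvDfsA] at hx ⊢
      by_cases hc : c ∈ v
      · simp only [if_pos hc] at hx; exact absurd hx hxv
      · simp only [if_neg hc] at hx ⊢
        have chain : ∀ (ds : List (Int × Int)),
            (∀ d ∈ ds, d = ((-1 : Int), (0 : Int)) ∨ d = (1, 0) ∨ d = (0, -1) ∨ d = (0, 1)) →
            ∀ a, (∀ z, z ∈ v ∨ z = c → z ∈ a) →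
            (∀ y ∈ a, y ∉ v → y ≠ c → ∀ m, pvStep maze rows cols y m → m ∈ a) →
            (∀ y ∈ a, y ∈ ds.foldl (fun acc d =>
                if pvOk maze rows cols (c.1 + d.1, c.2 + d.2) then
                  pvDfsA maze rows cols f (c.1 + d.1, c.2 + d.2) acc
                else acc) a) ∧
            (∀ z, z ∈ v ∨ z = c → z ∈ ds.foldl (fun acc d =>
                if pvOk maze rows cols (c.1 + d.1, c.2 + d.2) then
                  pvDfsA maze rows cols f (c.1 + d.1, c.2 + d.2) acc
                else acc) a) ∧
            (∀ y ∈ ds.foldl (fun acc d =>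
                if pvOk maze rows cols (c.1 + d.1, c.2 + d.2) then
                  pvDfsA maze rows cols f (c.1 + d.1, c.2 + d.2) acc
                else acc) a, y ∉ v → y ≠ c → ∀ m, pvStep maze rows cols y m →
                m ∈ ds.foldl (fun acc d =>
                  if pvOk maze rows cols (c.1 + d.1, c.2 + d.2) then
                    pvDfsA maze rows cols f (c.1 + d.1, c.2 + d.2) acc
                  else acc) a) ∧
            (∀ d ∈ ds, pvOk maze rows cols (c.1 + d.1, c.2 + d.2) = true →
              (c.1 + d.1, c.2 + d.2) ∈ ds.foldl (fun acc d =>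
                if pvOk maze rows cols (c.1 + d.1, c.2 + d.2) then
                  pvDfsA maze rows cols f (c.1 + d.1, c.2 + d.2) acc
                else acc) a) := by
          intro ds
          induction ds with
          | nil =>
              intro _ a hsub hcl
              exact ⟨fun y hy => hy, fun z hz => hsub z hz, fun y hy => hcl y hy, by simp⟩
          | cons d ds ihd =>
              intro hforms a hsub hcl
              simp only [List.foldl_cons]
              by_cases hok : pvOk maze rows cols (c.1 + d.1, c.2 + d.2) = true
              · have hμ' : pvMuA rows cols (c.1 + d.1, c.2 + d.2) a < f := by
                  have h1 := pvMu_lt (rows := rows) (cols := cols) hc hsub (pvOk_mem_cells hok)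
                  omega
                have hposf : 0 < f := by omega
                have hmono : ∀ y ∈ a, y ∈ pvDfsA maze rows cols f (c.1 + d.1, c.2 + d.2) a :=
                  fun y hy => pvDfsA_mono maze rows cols f _ a y hy
                have hself : (c.1 + d.1, c.2 + d.2) ∈ pvDfsA maze rows cols f (c.1 + d.1, c.2 + d.2) a :=
                  pvDfsA_self maze rows cols f hposf _ a
                have hsub' : ∀ z, z ∈ v ∨ z = c → z ∈ pvDfsA maze rows cols f (c.1 + d.1, c.2 + d.2) a :=
                  fun z hz => hmono z (hsub z hz)
                have hcl' : ∀ y ∈ pvDfsA maze rows cols f (c.1 + d.1, c.2 + d.2) a,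
                    y ∉ v → y ≠ c → ∀ m, pvStep maze rows cols y m →
                    m ∈ pvDfsA maze rows cols f (c.1 + d.1, c.2 + d.2) a := by
                  intro y hy hyv hyc m hm
                  by_cases hya : y ∈ a
                  · exact hmono m (hcl y hya hyv hyc m hm)
                  · exact ih (c.1 + d.1, c.2 + d.2) a hμ' y hy hya m hm
                obtain ⟨R1, R2, R3, R4⟩ := ihd (fun e he => hforms e (List.mem_cons_of_mem _ he))
                  _ hsub' hcl'
                rw [if_pos hok]
                refine ⟨fun y hy => R1 y (hmono y hy), R2, R3, ?_⟩
                intro e he hoke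
                rcases List.mem_cons.mp he with rfl | he
                · exact R1 _ hself
                · exact R4 e he hoke
              · rw [if_neg hok]
                obtain ⟨R1, R2, R3, R4⟩ := ihd (fun e he => hforms e (List.mem_cons_of_mem _ he))
                  _ hsub hcl
                refine ⟨R1, R2, R3, ?_⟩
                intro e he hoke
                rcases List.mem_cons.mp he with rfl | he
                · exact absurd hoke hok
                · exact R4 e he hoke
        obtain ⟨_, _, H3, H4⟩ := chain [((-1 : Int), (0 : Int)), (1, 0), (0, -1), (0, 1)]
          (by decide) (PySem.Set.add v c)
          (fun z hz => (PySem.Set.mem_add _ _ _).mpr (by tauto))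
          (by
            intro y hy hyv hyc m hm
            rcases (PySem.Set.mem_add _ _ _).mp hy with hy | rfl
            · exact absurd hy hyv
            · exact absurd rfl hyc)
        by_cases hxc : x = c
        · subst hxc
          rcases hstep.2 with hn | hn | hn | hn
          · have he : n = (x.1 + (-1 : Int), x.2 + (0 : Int)) := by rw [hn]; simp [Prod.ext_iff]; omega
            rw [he] at hstep ⊢
            exact H4 ((-1 : Int), (0 : Int)) (by norm_num) hstep.1
          · have he : n = (x.1 + (1 : Int), x.2 + (0 : Int)) := by rw [hn]; simp [Prod.ext_iff]
            rw [he] at hstep ⊢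
            exact H4 ((1 : Int), (0 : Int)) (by norm_num) hstep.1
          · have he : n = (x.1 + (0 : Int), x.2 + (-1 : Int)) := by rw [hn]; simp [Prod.ext_iff]; omega
            rw [he] at hstep ⊢
            exact H4 ((0 : Int), (-1 : Int)) (by norm_num) hstep.1
          · have he : n = (x.1 + (0 : Int), x.2 + (1 : Int)) := by rw [hn]; simp [Prod.ext_iff]
            rw [he] at hstep ⊢
            exact H4 ((0 : Int), (1 : Int)) (by norm_num) hstep.1
        · exact H3 x hx hxv hxc n hstep

theorem pvDfsA_spec (maze : List (List Int)) (rows cols : Nat) (s t : Int × Int) :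
    t ∈ pvDfsA maze rows cols (rows * cols + 2) s PySem.Set.empty ↔ pvReach maze rows cols s t := by
  have hμ : pvMuA rows cols s PySem.Set.empty < rows * cols + 2 := by
    unfold pvMuA
    have h1 : (PySem.Set.empty : PySem.Set (Int × Int)).toFinset = ∅ := rfl
    rw [h1, Finset.sdiff_empty]
    have h2 : (pvCells rows cols).card ≤ rows * cols := by
      refine le_trans Finset.card_image_le ?_
      simp [Finset.card_product]
    have := Finset.card_insert_le s (pvCells rows cols)
    omega
  constructor
  · intro h
    rcases pvDfsA_sound maze rows cols _ s PySem.Set.empty t h with hv | hr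
    · simp [PySem.Set.empty] at hv
    · exact hr
  · intro h
    induction h with
    | refl => exact pvDfsA_self maze rows cols _ (by omega) s _
    | tail h1 h2 ih =>
        exact pvDfsA_closed maze rows cols _ s PySem.Set.empty hμ _ ih
          (by simp [PySem.Set.empty]) _ h2

-- ===== VERDICT (by name: the statement is the Claim_ definition above) =====
theorem fil_d_ariane_spec : Claim_equal_fil_d_ariane := by
  intro maze joueur items _ _
  unfold Spec_fil_d_ariane fil_d_ariane fil_d_ariane_alt
  have hv : ∀ t : Int × Int,
      decide (t ∈ pvDfsA maze maze.length (maze.headD []).length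
          (maze.length * (maze.headD []).length + 2)
          ((PySem.Dict.ofList joueur).getD "x" 0, (PySem.Dict.ofList joueur).getD "y" 0)
          PySem.Set.empty) =
      decide (t ∈ pvFloodB maze maze.length (maze.headD []).length
          [((PySem.Dict.ofList joueur).getD "x" 0, (PySem.Dict.ofList joueur).getD "y" 0)]
          PySem.Set.empty) := by
    intro t
    exact decide_eq_decide.mpr ((pvDfsA_spec _ _ _ _ _).trans (pvFloodB_spec _ _ _ _ _).symm)
  have hfun := funext hv
  simp only [hfun]
  cases h : ((List.range maze.length).flatMap (fun x =>
    (List.range (maze.headD []).length).filterMap (fun y =>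
      if PySem.List.pyGetD (PySem.List.pyGetD maze (x : Int) []) (y : Int) 0 == 2 then
        some ((x : Int), (y : Int))
      else none))).isEmpty <;>
    simp [h, List.all_append, Bool.and_assoc]
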